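-- pv_equiv track=rewrite | github.com/danielgonzagat/peninaocubo | penin/policies.py | _contains_pii_patterns
-- ===== SOURCE A (Python) =====
-- def _contains_pii_patterns(content: str) -> bool:
--     """Check if content contains PII patterns."""
--     pii_patterns = [
--         "social security number",
--         "credit card number",
--         "bank account",
--         "passport number",
--         "driver's license",
--     ]
--     return any(pattern in content.lower() for pattern in pii_patterns)
-- ===== SOURCE B (Python) =====
-- _PII_PATTERNS = [
--     "social security number",
--     "credit card number",
--     "bank account",
--     "passport number",
--     "driver's license",
-- ]
--
--
-- def _match_at(content, i, pattern):
--     """Does `pattern` (already lowercase) match case-insensitively at position i?"""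
--     if i + len(pattern) > len(content):
--         return False
--     for k in range(len(pattern)):
--         if content[i + k].lower() != pattern[k]:
--             return False
--     return True
--
--
-- def _contains_pii_patterns(content: str) -> bool:
--     """Check if content contains PII patterns.
--
--     Single left-to-right scan: at each position try every pattern
--     case-insensitively, instead of five independent substring searches
--     over a lowered copy of the content.
--     """
--     for i in range(len(content) + 1):
--         for pattern in _PII_PATTERNS:
--             if _match_at(content, i, pattern):
--                 return True
--     return False
-- ===== Notes on version B (the rewrite author's own statement) =====
-- stated objective: alternative
-- what changed: Replaces five independent substring searches over a lowered copy of the content by a single left-to-right positional scan that tries each pattern case-insensitively in place, never materialising content.lower().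
import Mathlib
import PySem

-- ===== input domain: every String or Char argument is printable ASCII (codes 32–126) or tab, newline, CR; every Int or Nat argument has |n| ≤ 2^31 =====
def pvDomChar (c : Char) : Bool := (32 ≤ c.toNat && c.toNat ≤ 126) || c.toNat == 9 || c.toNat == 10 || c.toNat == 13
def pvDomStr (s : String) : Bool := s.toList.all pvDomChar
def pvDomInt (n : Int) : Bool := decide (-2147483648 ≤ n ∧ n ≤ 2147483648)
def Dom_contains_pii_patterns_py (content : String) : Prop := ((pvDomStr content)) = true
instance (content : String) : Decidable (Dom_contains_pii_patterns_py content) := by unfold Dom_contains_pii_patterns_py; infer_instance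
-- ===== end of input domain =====

-- ===== PORT A =====
-- A: five independent case-folded substring membership tests (`pattern in content.lower()`).
def pvPiiPatterns : List String :=
  ["social security number", "credit card number", "bank account",
   "passport number", "driver's license"]

def contains_pii_patterns_py (content : String) : Bool :=
  pvPiiPatterns.any (fun pattern => PySem.Str.isIn pattern (PySem.Str.lower content))

-- ===== PORT B =====
-- B: one left-to-right scan; at each position try every pattern case-insensitively in place.
-- pvMatchAt p s: p (already lowercase) matches case-insensitively at the start of s.
def pvMatchAt : List Char → List Char → Bool
  | [], _ => true
  | _ :: _, [] => false
  | a :: p, c :: s => (a == PySem.Chars.lowerChar c) && pvMatchAt p s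

def pvPiiPatternsL : List (List Char) := pvPiiPatterns.map String.toList

def pvScan : List Char → Bool
  | [] => pvPiiPatternsL.any (fun p => p.isEmpty)
  | c :: rest =>
      pvPiiPatternsL.any (fun p => pvMatchAt p (c :: rest)) || pvScan rest

def contains_pii_patterns_py_alt (content : String) : Bool :=
  pvScan content.toList
-- ===== PRECONDITION & SPEC =====
def Spec_contains_pii_patterns_py (content : String) (out : Bool) : Prop := out = contains_pii_patterns_py_alt content
instance (content : String) (out : Bool) : Decidable (Spec_contains_pii_patterns_py content out) := by unfold Spec_contains_pii_patterns_py; infer_instance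

-- ===== CLAIM (what is proved, stated in full; the proofs are below) =====
def Claim_equal_contains_pii_patterns_py : Prop := ∀ (content : String), Dom_contains_pii_patterns_py content → Spec_contains_pii_patterns_py content (contains_pii_patterns_py content)

-- ===== LEMMAS AND PROOFS =====

theorem pvMatchAt_iff (p s : List Char) :
    pvMatchAt p s = true ↔ p <+: PySem.Chars.lower s := by
  induction p generalizing s with
  | nil => simp [pvMatchAt]
  | cons a p ih =>
    cases s with
    | nil => simp [pvMatchAt, PySem.Chars.lower]
    | cons c s =>
      simp [pvMatchAt, PySem.Chars.lower, List.cons_prefix_cons, ih,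
        PySem.Chars.lower, and_comm]

theorem pvScan_iff (s : List Char) :
    pvScan s = true ↔ ∃ p ∈ pvPiiPatternsL, ∃ j, p <+: (PySem.Chars.lower s).drop j := by
  induction s with
  | nil =>
    simp [pvScan, PySem.Chars.lower, List.prefix_nil]
  | cons c rest ih =>
    rw [pvScan]
    simp only [Bool.or_eq_true, List.any_eq_true, pvMatchAt_iff, ih]
    constructor
    · rintro (⟨p, hp, hpre⟩ | ⟨p, hp, j, hpre⟩)
      · exact ⟨p, hp, 0, by simpa using hpre⟩
      · exact ⟨p, hp, j + 1, by simpa [PySem.Chars.lower] using hpre⟩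
    · rintro ⟨p, hp, j, hpre⟩
      cases j with
      | zero => exact Or.inl ⟨p, hp, by simpa using hpre⟩
      | succ j => exact Or.inr ⟨p, hp, j, by simpa [PySem.Chars.lower] using hpre⟩

theorem pvA_iff (content : String) :
    contains_pii_patterns_py content = true ↔
      ∃ p ∈ pvPiiPatternsL, ∃ j, p <+: (PySem.Chars.lower content.toList).drop j := by
  simp only [contains_pii_patterns_py, List.any_eq_true]
  constructor
  · rintro ⟨pattern, hp, hin⟩
    refine ⟨pattern.toList, List.mem_map_of_mem hp, ?_⟩
    rw [PySem.Str.isIn_iff_infix, PySem.Str.toList_lower] at hin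
    exact (PySem.Chars.exists_prefix_drop_iff_isIn _ _).2
      (by rw [PySem.Chars.isIn_iff_infix]; exact hin) |> fun ⟨j, h⟩ => ⟨j, h⟩
  · rintro ⟨p, hp, j, hpre⟩
    obtain ⟨pattern, hpm, rfl⟩ := List.mem_map.1 hp
    refine ⟨pattern, hpm, ?_⟩
    rw [PySem.Str.isIn_iff_infix, PySem.Str.toList_lower]
    rw [← PySem.Chars.isIn_iff_infix]
    exact (PySem.Chars.exists_prefix_drop_iff_isIn _ _).1 ⟨j, hpre⟩

-- ===== VERDICT (by name: the statement is the Claim_ definition above) =====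
theorem contains_pii_patterns_py_spec : Claim_equal_contains_pii_patterns_py := by
  intro content _
  unfold Spec_contains_pii_patterns_py contains_pii_patterns_py_alt
  rw [Bool.eq_iff_iff, pvA_iff, pvScan_iff]
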